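-- pv_equiv track=rewrite | github.com/mjsmith95/MCDataVis | src/StudentObjectSerializer.py | calculate_times_and_dates_per_rank
-- ===== SOURCE A (Python) =====
-- def calculate_times_and_dates_per_rank(lessons, lesson_dates):
--     """
--
--     :param lessons:
--     :param lesson_dates:
--     :return:
--     """
--     time_per_rank = []
--     date_per_rank = []
--     current_rank_rates = []
--     total_completed_lessons = len(lessons)
--     for i in range(0, total_completed_lessons):
--         if i % 5 == 0 and i != 0 or i + 1 == total_completed_lessons:
--             time_per_rank.append(sum(current_rank_rates))
--             date_per_rank.append(lesson_dates[i])
--             current_rank_rates = [lessons[i]]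
--         else:
--             current_rank_rates.append(lessons[i])
--     return time_per_rank, date_per_rank
-- ===== SOURCE B (Python) =====
-- def calculate_times_and_dates_per_rank(lessons, lesson_dates):
--     n = len(lessons)
--     boundaries = [i for i in range(n) if (i % 5 == 0 and i != 0) or i + 1 == n]
--     time_per_rank = []
--     date_per_rank = []
--     prev = 0
--     for b in boundaries:
--         time_per_rank.append(sum(lessons[prev:b]))
--         date_per_rank.append(lesson_dates[b])
--         prev = b
--     return time_per_rank, date_per_rank
-- ===== Notes on version B (the rewrite author's own statement) =====
-- stated objective: alternative
-- what changed: B replaces A's single accumulate-and-flush pass with a running buffer list by first computing the list of boundary indices and then summing each slice lessons[prev:b] between consecutive boundaries.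
import Mathlib
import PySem

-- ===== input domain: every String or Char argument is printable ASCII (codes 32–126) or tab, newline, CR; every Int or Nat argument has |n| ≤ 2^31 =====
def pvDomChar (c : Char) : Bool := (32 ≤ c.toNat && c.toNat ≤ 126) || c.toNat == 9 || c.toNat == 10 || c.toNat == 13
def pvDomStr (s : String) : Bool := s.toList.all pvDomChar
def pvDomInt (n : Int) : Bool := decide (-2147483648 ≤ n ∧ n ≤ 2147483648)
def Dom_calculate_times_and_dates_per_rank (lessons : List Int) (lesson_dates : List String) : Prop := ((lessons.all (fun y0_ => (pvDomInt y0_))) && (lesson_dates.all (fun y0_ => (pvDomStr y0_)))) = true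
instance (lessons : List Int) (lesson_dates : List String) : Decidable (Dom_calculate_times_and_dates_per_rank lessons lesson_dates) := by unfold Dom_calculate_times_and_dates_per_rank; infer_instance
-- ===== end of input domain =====

-- B computes the boundary indices first, then sums the slice between consecutive boundaries,
-- instead of A's accumulate-and-flush pass carrying a buffer list (alternative decomposition, same cost).

-- ===== PORT A =====
-- one loop step of A: state = (time_per_rank, date_per_rank, current_rank_rates).
-- indices i are nonnegative (range(0, n)), so lessons[i]/lesson_dates[i] is plain Nat indexing;
-- getD's default is never used on inputs satisfying Pre_ (exactly where Python A does not raise).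
def pvAStep (lessons : List Int) (lesson_dates : List String) (n : Nat)
    (st : List Int × List String × List Int) (i : Nat) : List Int × List String × List Int :=
  let (tpr, dpr, cur) := st
  if (i % 5 == 0 && i != 0) || (i + 1 == n) then
    (tpr ++ [cur.sum], dpr ++ [lesson_dates.getD i ""], [lessons.getD i 0])
  else
    (tpr, dpr, cur ++ [lessons.getD i 0])

def calculate_times_and_dates_per_rank (lessons : List Int) (lesson_dates : List String) : List Int × List String :=
  let n := lessons.length
  let st := (List.range n).foldl (pvAStep lessons lesson_dates n) ([], [], [])
  (st.1, st.2.1)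

-- ===== PORT B =====
-- one loop step of B: state = (time_per_rank, date_per_rank, prev);
-- lessons[prev:b] = (lessons.drop prev).take (b - prev), exact since 0 ≤ prev ≤ b here.
def pvBStep (lessons : List Int) (lesson_dates : List String)
    (st : List Int × List String × Nat) (b : Nat) : List Int × List String × Nat :=
  let (tpr, dpr, prev) := st
  (tpr ++ [((lessons.drop prev).take (b - prev)).sum], dpr ++ [lesson_dates.getD b ""], b)

def calculate_times_and_dates_per_rank_alt (lessons : List Int) (lesson_dates : List String) : List Int × List String :=
  let n := lessons.length
  let boundaries := (List.range n).filter (fun i => (i % 5 == 0 && i != 0) || (i + 1 == n))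
  let st := boundaries.foldl (pvBStep lessons lesson_dates) ([], [], 0)
  (st.1, st.2.1)

-- ===== PRECONDITION & SPEC =====
-- Pre_ excludes exactly the inputs where Python A raises IndexError: lesson_dates shorter than
-- lessons (the last index len(lessons)-1 is always looked up in lesson_dates when lessons ≠ []).
def Pre_calculate_times_and_dates_per_rank (lessons : List Int) (lesson_dates : List String) : Prop :=
  lessons.length ≤ lesson_dates.length
instance (lessons : List Int) (lesson_dates : List String) : Decidable (Pre_calculate_times_and_dates_per_rank lessons lesson_dates) := by unfold Pre_calculate_times_and_dates_per_rank; infer_instance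

def pvWitness_calculate_times_and_dates_per_rank : List Int × List String := ([3, 1, 4, 1, 5, 9, 2], ["a", "b", "c", "d", "e", "f", "g"])

def Spec_calculate_times_and_dates_per_rank (lessons : List Int) (lesson_dates : List String) (out : List Int × List String) : Prop := out = calculate_times_and_dates_per_rank_alt lessons lesson_dates
instance (lessons : List Int) (lesson_dates : List String) (out : List Int × List String) : Decidable (Spec_calculate_times_and_dates_per_rank lessons lesson_dates out) := by unfold Spec_calculate_times_and_dates_per_rank; infer_instance

-- ===== CLAIM (what is proved, stated in full; the proofs are below) =====
def Claim_equal_calculate_times_and_dates_per_rank : Prop := ∀ (lessons : List Int) (lesson_dates : List String), Dom_calculate_times_and_dates_per_rank lessons lesson_dates → Pre_calculate_times_and_dates_per_rank lessons lesson_dates → Spec_calculate_times_and_dates_per_rank lessons lesson_dates (calculate_times_and_dates_per_rank lessons lesson_dates)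

-- ===== LEMMAS AND PROOFS =====

-- taking one more element of a slice appends the element at absolute index j
lemma pv_take_succ_slice (l : List Int) (prev j : Nat) (hpj : prev ≤ j) (hj : j < l.length) :
    (l.drop prev).take (j + 1 - prev) = (l.drop prev).take (j - prev) ++ [l.getD j 0] := by
  have h1 : j + 1 - prev = (j - prev) + 1 := by omega
  rw [h1, List.take_add_one]
  have h2 : (l.drop prev)[j - prev]? = l[j]? := by
    rw [List.getElem?_drop]
    congr 1
    omega
  have h3 : l[j]? = some (l.getD j 0) := by
    rw [List.getD_eq_getElem?_getD, List.getElem?_eq_getElem hj]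
    rfl
  rw [h2, h3]
  rfl

-- main invariant: folding A's step over [j, j+n) with buffer cur agrees (on the first two
-- components) with folding B's step over the boundaries in [j, j+n), provided cur sums to
-- the slice lessons[prev:j].
lemma pv_loop_eq (lessons : List Int) (lesson_dates : List String) (N : Nat) (hN : N = lessons.length) :
    ∀ (k j : Nat) (t : List Int) (d : List String) (cur : List Int) (prev : Nat),
      j + k = N → prev ≤ j →
      cur.sum = ((lessons.drop prev).take (j - prev)).sum →
      (let a := (List.range' j k).foldl (pvAStep lessons lesson_dates N) (t, d, cur)
       let b := ((List.range' j k).filter (fun i => (i % 5 == 0 && i != 0) || (i + 1 == N))).foldl (pvBStep lessons lesson_dates) (t, d, prev)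
       a.1 = b.1 ∧ a.2.1 = b.2.1) := by
  intro k
  induction k with
  | zero => intro j t d cur prev _ _ _; simp
  | succ m ih =>
    intro j t d cur prev hjk hpj hsum
    have hjN : j < N := by omega
    have hjlen : j < lessons.length := by omega
    rw [List.range'_succ]
    by_cases hb : ((j % 5 == 0 && j != 0) || (j + 1 == N)) = true
    · -- j is a boundary: both flush; A resets cur to [lessons[j]], B moves prev to j
      simp only [List.filter_cons, hb, if_pos, List.foldl_cons]
      have hA : pvAStep lessons lesson_dates N (t, d, cur) j =
          (t ++ [cur.sum], d ++ [lesson_dates.getD j ""], [lessons.getD j 0]) := by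
        simp [pvAStep, hb]
      have hB : pvBStep lessons lesson_dates (t, d, prev) j =
          (t ++ [((lessons.drop prev).take (j - prev)).sum], d ++ [lesson_dates.getD j ""], j) := by
        simp [pvBStep]
      rw [hA, hB, hsum]
      apply ih (j + 1) _ _ _ j (by omega) (by omega)
      have : (lessons.drop j).take (j + 1 - j) = (lessons.drop j).take (j - j) ++ [lessons.getD j 0] :=
        pv_take_succ_slice lessons j j (le_refl j) hjlen
      simp only [this]
      simp
    · -- j is not a boundary: A appends lessons[j] to cur, B skips j
      simp only [List.filter_cons, hb, List.foldl_cons, Bool.false_eq_true, if_false]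
      have hA : pvAStep lessons lesson_dates N (t, d, cur) j =
          (t, d, cur ++ [lessons.getD j 0]) := by
        simp only [pvAStep]
        rw [if_neg (by simpa using hb)]
      rw [hA]
      apply ih (j + 1) _ _ _ prev (by omega) (by omega)
      rw [pv_take_succ_slice lessons prev j hpj hjlen]
      simp [hsum]

-- ===== VERDICT (by name: the statement is the Claim_ definition above) =====
theorem calculate_times_and_dates_per_rank_spec : Claim_equal_calculate_times_and_dates_per_rank := by
  intro lessons lesson_dates _ _
  unfold Spec_calculate_times_and_dates_per_rank
  unfold calculate_times_and_dates_per_rank calculate_times_and_dates_per_rank_alt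
  have h := pv_loop_eq lessons lesson_dates lessons.length rfl lessons.length 0 [] [] [] 0
    (by omega) (by omega) (by simp)
  simp only [List.range_eq_range'] at *
  exact Prod.ext h.1 h.2
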